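-- pv_equiv track=rewrite | github.com/szymonrybacki/Python | labs/lab02/zad5.py | transposition_cipher
-- ===== SOURCE A (Python) =====
-- def transposition_cipher(text: str, key: int) -> str:
--     if key > len(text):
--         return text
--     chars = list(text)
--     for i in range(0, len(chars), key):
--         if i + key < len(chars):
--             chars[i], chars[i + key] = chars[i + key], chars[i]
--     return "".join(chars)
-- ===== SOURCE B (Python) =====
-- def transposition_cipher(text: str, key: int) -> str:
--     chars = list(text)
--     idx = list(range(0, len(chars), key))  # raises ValueError for key == 0, like A
--     vals = [chars[i] for i in idx]
--     for i, v in zip(idx, vals[1:] + vals[:1]):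
--         chars[i] = v
--     return "".join(chars)
-- ===== Notes on version B (the rewrite author's own statement) =====
-- stated objective: simpler
-- what changed: A performs a sequence of overlapping in-place swaps of chars[i] and chars[i+key]; B extracts the values at the anchor positions range(0, len, key), rotates that value list left by one, and writes it back in a single pass.
import Mathlib
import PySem

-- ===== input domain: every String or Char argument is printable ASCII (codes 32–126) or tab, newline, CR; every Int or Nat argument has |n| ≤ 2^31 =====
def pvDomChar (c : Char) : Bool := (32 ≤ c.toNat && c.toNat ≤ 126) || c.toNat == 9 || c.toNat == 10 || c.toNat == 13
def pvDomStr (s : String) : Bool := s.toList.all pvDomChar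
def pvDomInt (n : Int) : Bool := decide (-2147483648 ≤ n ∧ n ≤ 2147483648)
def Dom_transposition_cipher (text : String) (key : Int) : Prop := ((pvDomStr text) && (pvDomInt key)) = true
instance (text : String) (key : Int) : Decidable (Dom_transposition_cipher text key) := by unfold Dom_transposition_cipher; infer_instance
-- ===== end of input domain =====

-- B replaces A's sequence of overlapping in-place swaps by extracting the anchor positions
-- range(0, len, key), rotating their values left by one, and writing them back (objective: simpler).

-- ===== PORT A =====
def transposition_cipher (text : String) (key : Int) : String :=
  if key > PySem.Str.len text then text
  else
    let chars := text.toList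
    let chars := (PySem.List.pyRange 0 (chars.length : Int) key).foldl
      (fun cs i =>
        if i + key < (cs.length : Int) then
          (cs.set i.toNat ((PySem.List.pyGet? cs (i + key)).getD ' ')).set
            (i + key).toNat ((PySem.List.pyGet? cs i).getD ' ')
        else cs) chars
    String.ofList chars

-- ===== PORT B =====
def transposition_cipher_alt (text : String) (key : Int) : String :=
  let chars := text.toList
  let idx := PySem.List.pyRange 0 (chars.length : Int) key
  let vals := idx.map (fun i => (PySem.List.pyGet? chars i).getD ' ')
  let chars := (idx.zip (vals.drop 1 ++ vals.take 1)).foldl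
      (fun cs p => cs.set p.1.toNat p.2) chars
  String.ofList chars

-- ===== PRECONDITION & SPEC =====
-- Pre_ excludes exactly key = 0, where Python's range(0, len, 0) makes A raise ValueError (B raises there too).
def Pre_transposition_cipher (text : String) (key : Int) : Prop := key ≠ 0
instance (text : String) (key : Int) : Decidable (Pre_transposition_cipher text key) := by unfold Pre_transposition_cipher; infer_instance
def pvWitness_transposition_cipher : String × Int := ("abcdef", 2)

def Spec_transposition_cipher (text : String) (key : Int) (out : String) : Prop := out = transposition_cipher_alt text key
instance (text : String) (key : Int) (out : String) : Decidable (Spec_transposition_cipher text key out) := by unfold Spec_transposition_cipher; infer_instance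

-- ===== CLAIM (what is proved, stated in full; the proofs are below) =====
def Claim_equal_transposition_cipher : Prop := ∀ (text : String) (key : Int), Dom_transposition_cipher text key → Pre_transposition_cipher text key → Spec_transposition_cipher text key (transposition_cipher text key)

-- ===== LEMMAS AND PROOFS =====

-- A's chain of overlapping swaps, on Nat positions.
def chainSwaps : List Char → List Nat → List Char
  | cs, i :: j :: rest =>
      chainSwaps ((cs.set i (cs[j]?.getD ' ')).set j (cs[i]?.getD ' ')) (j :: rest)
  | cs, _ => cs

-- B's rotate-and-write-back, on Nat positions.
def writeRot (cs : List Char) (l : List Nat) : List Char :=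
  let vals := l.map (fun i => cs[i]?.getD ' ')
  (l.zip (vals.drop 1 ++ vals.take 1)).foldl (fun acc p => acc.set p.1 p.2) cs

theorem pyRange_neg_empty (n s : Int) (h : 0 ≤ n) (hs : s < 0) :
    PySem.List.pyRange 0 n s = [] := by
  unfold PySem.List.pyRange
  rw [if_neg (by omega), if_neg (by omega : ¬ 0 < s), if_neg (by omega)]
  simp

theorem pyRange_pos_eq (N K : Nat) (hK : 1 ≤ K) :
    PySem.List.pyRange 0 (N : Int) (K : Int)
      = ((List.range (if 0 < N then (N + K - 1) / K else 0)).map (· * K)).map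
          (fun i : Nat => (i : Int)) := by
  rw [PySem.List.pyRange_of_pos _ _ (by exact_mod_cast hK)]
  rw [List.map_map]
  congr 1
  · funext k
    simp [mul_comm]
  · congr 1
    split_ifs with h1 h2 h3
    · have h : ((N : Int) - 0 + K - 1) = ((N + K - 1 : Nat) : Int) := by omega
      rw [h, show ((N + K - 1 : Nat) : Int) / (K : Int) = (((N + K - 1) / K : Nat) : Int) from
        (Int.natCast_div _ _).symm, Int.toNat_natCast]
    · exact absurd (by exact_mod_cast h1) h2
    · exact absurd (by exact_mod_cast h3) h1
    · rfl

theorem set_getD_self (l : List Char) (i : Nat) :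
    l.set i (l[i]?.getD ' ') = l := by
  by_cases h : i < l.length
  · rw [List.getElem?_eq_getElem h]; simp
  · rw [List.set_eq_of_length_le (by omega)]

theorem chain_eq_rot (cs : List Char) (l : List Nat)
    (hp : l.Pairwise (· < ·)) (hb : ∀ i ∈ l, i < cs.length) :
    chainSwaps cs l = writeRot cs l := by
  induction l generalizing cs with
  | nil => simp [chainSwaps, writeRot]
  | cons i t ih =>
    cases t with
    | nil =>
      simp only [chainSwaps, writeRot, List.map_cons, List.map_nil, List.drop_succ_cons,
        List.drop_zero, List.take_succ_cons, List.take_zero, List.nil_append,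
        List.zip_cons_cons, List.zip_nil_right, List.foldl_cons, List.foldl_nil]
      exact (set_getD_self cs i).symm
    | cons j rest =>
      have hij : i < j := (List.pairwise_cons.1 hp).1 j (by simp)
      have hinr : ∀ r ∈ rest, i < r := fun r hr => (List.pairwise_cons.1 hp).1 r (by simp [hr])
      have hjnr : ∀ r ∈ rest, j < r := fun r hr =>
        (List.pairwise_cons.1 (List.pairwise_cons.1 hp).2).1 r hr
      have hjlen : j < cs.length := hb j (by simp)
      set vi := cs[i]?.getD ' ' with hvi
      set vj := cs[j]?.getD ' ' with hvj
      set cs' := (cs.set i vj).set j vi with hcs'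
      have hlen' : cs'.length = cs.length := by simp [hcs']
      rw [show chainSwaps cs (i :: j :: rest) = chainSwaps cs' (j :: rest) from rfl]
      rw [ih cs' (List.pairwise_cons.1 hp).2
        (fun r hr => by rw [hlen']; exact hb r (List.mem_cons_of_mem _ hr))]
      have hgj : cs'[j]?.getD ' ' = vi := by
        rw [hcs', List.getElem?_set_self (by simpa using hjlen)]; rfl
      have hgr : ∀ r ∈ rest, cs'[r]?.getD ' ' = cs[r]?.getD ' ' := by
        intro r hr
        rw [hcs', List.getElem?_set_ne (Nat.ne_of_lt (hjnr r hr)),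
            List.getElem?_set_ne (Nat.ne_of_lt (hinr r hr))]
      unfold writeRot
      simp only [List.map_cons]
      rw [hgj, List.map_congr_left hgr]
      set vr := rest.map (fun r => cs[r]?.getD ' ') with hvr
      simp only [List.drop_succ_cons, List.drop_zero, List.take_succ_cons, List.take_zero]
      obtain ⟨w0, wt, hw⟩ : ∃ w0 wt, vr ++ [vi] = w0 :: wt := by
        cases h : vr with
        | nil => exact ⟨vi, [], by simp⟩
        | cons a b => exact ⟨a, b ++ [vi], by simp⟩
      rw [show (vj :: vr) ++ [vi] = vj :: (vr ++ [vi]) from rfl, hw]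
      simp only [List.zip_cons_cons, List.foldl_cons]
      rw [hcs', List.set_set]

theorem foldA_eq_chain (key : Int) (cs : List Char) (l : List Nat)
    (hchain : l.IsChain (fun (a b : Nat) => (b : Int) = (a : Int) + key))
    (hmem : ∀ i ∈ l, i < cs.length)
    (hlast : ∀ i, l.getLast? = some i → ¬ ((i : Int) + key < (cs.length : Int))) :
    (l.map (fun i : Nat => (i : Int))).foldl
      (fun cs i =>
        if i + key < (cs.length : Int) then
          (cs.set i.toNat ((PySem.List.pyGet? cs (i + key)).getD ' ')).set
            (i + key).toNat ((PySem.List.pyGet? cs i).getD ' ')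
        else cs) cs
    = chainSwaps cs l := by
  induction l generalizing cs with
  | nil => simp [chainSwaps]
  | cons i t ih =>
    cases t with
    | nil =>
      simp only [List.map_cons, List.map_nil, List.foldl_cons, List.foldl_nil, chainSwaps]
      rw [if_neg (hlast i rfl)]
    | cons j rest =>
      have hj : (j : Int) = (i : Int) + key := (List.isChain_cons_cons.1 hchain).1
      have hjlen : j < cs.length := hmem j (by simp)
      rw [List.map_cons, List.foldl_cons]
      rw [if_pos (show (i : Int) + key < (cs.length : Int) by rw [← hj]; exact_mod_cast hjlen)]
      rw [show chainSwaps cs (i :: j :: rest)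
            = chainSwaps ((cs.set i (cs[j]?.getD ' ')).set j (cs[i]?.getD ' ')) (j :: rest) from rfl]
      have e1 : ((i : Int) + key).toNat = j := by omega
      have e2 : (PySem.List.pyGet? cs ((i : Int) + key)).getD ' ' = cs[j]?.getD ' ' := by
        rw [← hj, PySem.List.pyGet?_natCast]
      have e3 : (PySem.List.pyGet? cs (i : Int)).getD ' ' = cs[i]?.getD ' ' := by
        rw [PySem.List.pyGet?_natCast]
      rw [Int.toNat_natCast, e1, e2, e3]
      set cs' := (cs.set i (cs[j]?.getD ' ')).set j (cs[i]?.getD ' ') with hcs'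
      have hlen' : cs'.length = cs.length := by simp [hcs']
      exact ih cs' (List.isChain_cons_cons.1 hchain).2
        (fun r hr => by rw [hlen']; exact hmem r (List.mem_cons_of_mem _ hr))
        (fun r hr => by
          rw [hlen']
          exact hlast r (by simp [List.getLast?_cons_cons] at hr ⊢; exact hr))

theorem zipfold_cast (l : List Nat) (w : List Char) (cs : List Char) :
    ((l.map (fun i : Nat => (i : Int))).zip w).foldl (fun cs p => cs.set p.1.toNat p.2) cs
      = (l.zip w).foldl (fun cs p => cs.set p.1 p.2) cs := by
  induction l generalizing w cs with
  | nil => simp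
  | cons a l ih =>
      cases w with
      | nil => simp
      | cons b w => simp [ih]

theorem str_len_eq (s : String) : PySem.Str.len s = (s.toList.length : Int) := by
  simp [PySem.Str.len]


theorem ceil_pos (N K : Nat) (hK : 1 ≤ K) (hN : 1 ≤ N) : 1 ≤ (N + K - 1) / K := by
  exact Nat.one_le_div_iff (by omega) |>.2 (by omega)

theorem ceil_mem (N K k : Nat) (hK : 1 ≤ K) (hk : k < (N + K - 1) / K) : k * K < N := by
  have hdm := Nat.div_add_mod (N + K - 1) K
  have hrlt : (N + K - 1) % K < K := Nat.mod_lt _ (by omega)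
  have h1 : (k + 1) * K ≤ K * ((N + K - 1) / K) := by
    rw [mul_comm]; exact Nat.mul_le_mul_left K (by omega)
  have h2 : (k + 1) * K = k * K + K := by ring
  generalize ha : k * K = a at *
  generalize hb : K * ((N + K - 1) / K) = b at *
  omega

theorem ceil_last (N K : Nat) (hK : 1 ≤ K) (hN : 1 ≤ N) :
    N ≤ ((N + K - 1) / K - 1) * K + K := by
  have hdm := Nat.div_add_mod (N + K - 1) K
  have hrlt : (N + K - 1) % K < K := Nat.mod_lt _ (by omega)
  have hm1 : 1 ≤ (N + K - 1) / K := ceil_pos N K hK hN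
  have h1 : ((N + K - 1) / K - 1) * K + K = ((N + K - 1) / K) * K := by
    rw [Nat.sub_mul, Nat.one_mul]
    have h : K ≤ ((N + K - 1) / K) * K := by
      calc K = 1 * K := (Nat.one_mul K).symm
      _ ≤ ((N + K - 1) / K) * K := Nat.mul_le_mul_right K hm1
    omega
  rw [h1, mul_comm]
  generalize hb : K * ((N + K - 1) / K) = b at *
  omega

theorem B_eq_writeRot (cs : List Char) (l : List Nat) :
    ((l.map (fun i : Nat => (i : Int))).zip
        ((((l.map (fun i : Nat => (i : Int))).map (fun i => (PySem.List.pyGet? cs i).getD ' ')).drop 1)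
          ++ (((l.map (fun i : Nat => (i : Int))).map (fun i => (PySem.List.pyGet? cs i).getD ' ')).take 1))).foldl
      (fun cs p => cs.set p.1.toNat p.2) cs = writeRot cs l := by
  have hv : (l.map (fun i : Nat => (i : Int))).map (fun i => (PySem.List.pyGet? cs i).getD ' ')
      = l.map (fun i => cs[i]?.getD ' ') := by
    rw [List.map_map]
    exact List.map_congr_left (fun i _ => by simp [PySem.List.pyGet?_natCast])
  rw [hv, zipfold_cast]
  rfl

-- ===== VERDICT (by name: the statement is the Claim_ definition above) =====
theorem transposition_cipher_spec : Claim_equal_transposition_cipher := by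
  intro text key _ hpre
  unfold Pre_transposition_cipher at hpre
  simp only [Spec_transposition_cipher, transposition_cipher, transposition_cipher_alt]
  rcases lt_trichotomy key 0 with hneg | hz | hpos
  · rw [pyRange_neg_empty _ _ (by exact_mod_cast Nat.zero_le _) hneg]
    rw [str_len_eq, if_neg (by omega)]
    simp
  · exact absurd hz hpre
  · obtain ⟨K, rfl⟩ : ∃ K : Nat, key = (K : Int) := ⟨key.toNat, (Int.toNat_of_nonneg hpos.le).symm⟩
    have hK : 1 ≤ K := by exact_mod_cast hpos
    rw [str_len_eq, pyRange_pos_eq _ K hK]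
    by_cases hKN : (K : Int) > (text.toList.length : Int)
    · rw [if_pos hKN]
      by_cases hN0 : 0 < text.toList.length
      · have hm1 : (text.toList.length + K - 1) / K = 1 :=
          Nat.div_eq_of_lt_le (by omega) (by omega)
        rw [if_pos hN0, hm1]
        simp only [List.range_one, List.map_cons, List.map_nil, Nat.zero_mul,
          Nat.cast_zero, List.drop_succ_cons, List.drop_nil, List.take_succ_cons,
          List.take_nil, List.nil_append, List.zip_cons_cons, List.zip_nil_right,
          List.foldl_cons, List.foldl_nil, Int.toNat_zero]
        rw [show (PySem.List.pyGet? text.toList 0) = text.toList[0]? from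
          PySem.List.pyGet?_natCast text.toList 0]
        rw [set_getD_self]
        simp
      · rw [if_neg hN0]
        simp
    · rw [if_neg hKN]
      have hKN' : K ≤ text.toList.length := by exact_mod_cast not_lt.1 hKN
      have hN1 : 0 < text.toList.length := Nat.lt_of_lt_of_le (by omega) hKN'
      rw [if_pos hN1]
      have hmemN : ∀ i ∈ (List.range ((text.toList.length + K - 1) / K)).map (· * K),
          i < text.toList.length := by
        intro i hi
        obtain ⟨k, hk, rfl⟩ := List.mem_map.1 hi
        exact ceil_mem _ _ _ hK (List.mem_range.1 hk)
      have hp : ((List.range ((text.toList.length + K - 1) / K)).map (· * K)).Pairwise (· < ·) :=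
        List.Pairwise.map _ (fun a b h => (Nat.mul_lt_mul_right (by omega)).2 h)
          List.pairwise_lt_range
      have hchain : ((List.range ((text.toList.length + K - 1) / K)).map (· * K)).IsChain
          (fun (a b : Nat) => (b : Int) = (a : Int) + (K : Int)) := by
        rw [List.isChain_iff_getElem]
        intro i hi
        simp only [List.length_map, List.length_range] at hi
        rw [List.getElem_map, List.getElem_map, List.getElem_range, List.getElem_range]
        push_cast [Nat.add_mul]
        ring
      have hlast : ∀ i,
          (((List.range ((text.toList.length + K - 1) / K)).map (· * K)).getLast? = some i) →
          ¬ ((i : Int) + (K : Int) < (text.toList.length : Int)) := by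
        intro i hi
        rw [List.getLast?_map, List.getLast?_range,
          if_neg (by have := ceil_pos text.toList.length K hK hN1; omega)] at hi
        simp only [Option.map_some, Option.some.injEq] at hi
        have h := ceil_last text.toList.length K hK hN1
        rw [← hi]
        generalize hb : ((text.toList.length + K - 1) / K - 1) * K = b at *
        omega
      rw [foldA_eq_chain (K : Int) text.toList _ hchain hmemN hlast]
      rw [chain_eq_rot _ _ hp hmemN]
      rw [B_eq_writeRot]
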